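-- pv_equiv track=rewrite | github.com/matthewvcarey1/listPrimeFactorsInPython | main.py | generate_index_format_string
-- ===== SOURCE A (Python) =====
-- def num_to_superscript(num):
--     superscript_digits = [
--         "\u2070",
--         "\u00B9",
--         "\u00B2",
--         "\u00B3",
--         "\u2074",
--         "\u2075",
--         "\u2076",
--         "\u2077",
--         "\u2078",
--         "\u2079"]
--     super_string_list = []
--     while num > 0:
--         value = num % 10
--         s = superscript_digits[value]
--         super_string_list.append(s)
--         num = num // 10
--     # The list is back to front lets reverse it.
--     super_string_list.reverse()
--     return ''.join(super_string_list)
--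
-- def generate_index_format_string(lbe):
--     string_list = []
--     first = True
--     for be in lbe:
--         if first is False:
--             string_list.append(" \u00D7 ")
--         first = False
--         base, exponent = be
--         string_list.append(str(base))
--         if exponent > 1:
--             string_list.append(num_to_superscript(exponent))
--     return ''.join(string_list)
-- ===== SOURCE B (Python) =====
-- _SUPER = str.maketrans("0123456789",
--                        "\u2070\u00b9\u00b2\u00b3\u2074\u2075\u2076\u2077\u2078\u2079")
--
--
-- def _term(be):
--     base, exponent = be
--     if exponent > 1:
--         return str(base) + str(exponent).translate(_SUPER)
--     return str(base)
--
--
-- def generate_index_format_string(lbe):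
--     return " \u00d7 ".join(map(_term, lbe))
-- ===== Notes on version B (the rewrite author's own statement) =====
-- stated objective: idiomatic
-- what changed: Superscript digits come from a translation table applied to str(exp) (no mod-10/div-10 loop, no reverse), and the result is built as ' × '.join of complete term strings instead of weaving separators with a first-flag accumulator loop.
import Mathlib
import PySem

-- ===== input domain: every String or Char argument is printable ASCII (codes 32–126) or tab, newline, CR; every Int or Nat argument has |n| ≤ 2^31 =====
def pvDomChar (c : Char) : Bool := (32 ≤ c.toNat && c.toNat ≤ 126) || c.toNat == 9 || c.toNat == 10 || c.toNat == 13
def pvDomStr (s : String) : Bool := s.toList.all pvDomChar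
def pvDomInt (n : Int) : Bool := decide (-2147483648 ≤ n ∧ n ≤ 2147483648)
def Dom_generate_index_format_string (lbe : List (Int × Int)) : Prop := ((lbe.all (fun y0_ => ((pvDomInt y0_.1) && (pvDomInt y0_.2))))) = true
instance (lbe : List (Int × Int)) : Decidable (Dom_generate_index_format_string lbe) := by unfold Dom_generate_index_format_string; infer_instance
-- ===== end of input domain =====

-- B replaces A's mod-10/div-10 superscript loop by a per-digit translation of str(exp)
-- and joins complete term strings with " × " instead of a first-flag separator loop (idiomatic).


-- ===== PORT A =====
-- superscript_digits list from num_to_superscript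
def pvSuperDigits : List String :=
  ["\u2070", "\u00B9", "\u00B2", "\u00B3", "\u2074", "\u2075", "\u2076", "\u2077", "\u2078", "\u2079"]

-- the 'while num > 0' loop of num_to_superscript, accumulating super_string_list
-- (the index num % 10 is always in range, so pyGetD's default is unreachable)
def pvSupLoop (num : Int) (acc : List String) : List String :=
  if hpos : num > 0 then
    let value := PySem.Int.mod num 10
    let s := PySem.List.pyGetD pvSuperDigits value ""
    pvSupLoop (PySem.Int.floordiv num 10) (acc ++ [s])
  else acc
termination_by num.toNat
decreasing_by
  have h10 : PySem.Int.floordiv num 10 = num / 10 := PySem.Int.floordiv_eq_ediv_of_pos (by omega)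
  rw [h10]; omega

def num_to_superscript (num : Int) : String :=
  PySem.Str.join "" ((pvSupLoop num []).reverse)

def generate_index_format_string (lbe : List (Int × Int)) : String :=
  let st := lbe.foldl (fun (st : List String × Bool) be =>
    let sl := if st.2 = false then st.1 ++ [" \u00D7 "] else st.1
    let sl := sl ++ [PySem.Int.toStr be.1]
    let sl := if be.2 > 1 then sl ++ [num_to_superscript be.2] else sl
    (sl, false)) ([], true)
  PySem.Str.join "" st.1

-- ===== PORT B =====
-- the translation table _SUPER as a character map (translate leaves unmapped chars unchanged)
def pvSupChar (c : Char) : Char :=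
  match c with
  | '0' => '\u2070' | '1' => '\u00B9' | '2' => '\u00B2' | '3' => '\u00B3' | '4' => '\u2074'
  | '5' => '\u2075' | '6' => '\u2076' | '7' => '\u2077' | '8' => '\u2078' | '9' => '\u2079'
  | c => c

-- _term: str(base) + str(exponent).translate(_SUPER) when exponent > 1
def pvTerm (be : Int × Int) : String :=
  if be.2 > 1 then
    String.ofList (PySem.Int.toChars be.1 ++ (PySem.Int.toChars be.2).map pvSupChar)
  else
    String.ofList (PySem.Int.toChars be.1)

def generate_index_format_string_alt (lbe : List (Int × Int)) : String :=
  PySem.Str.join " \u00D7 " (lbe.map pvTerm)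

-- ===== PRECONDITION & SPEC =====
def Spec_generate_index_format_string (lbe : List (Int × Int)) (out : String) : Prop := out = generate_index_format_string_alt lbe
instance (lbe : List (Int × Int)) (out : String) : Decidable (Spec_generate_index_format_string lbe out) := by unfold Spec_generate_index_format_string; infer_instance

-- ===== CLAIM (what is proved, stated in full; the proofs are below) =====
def Claim_equal_generate_index_format_string : Prop := ∀ (lbe : List (Int × Int)), Dom_generate_index_format_string lbe → Spec_generate_index_format_string lbe (generate_index_format_string lbe)

-- ===== LEMMAS AND PROOFS =====

-- digits of n, least significant first (proof-only helper)
def pvRevDigits (n : Nat) : List Char :=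
  if n = 0 then [] else Nat.digitChar (n % 10) :: pvRevDigits (n / 10)
decreasing_by exact Nat.div_lt_self (by omega) (by omega)

theorem pvRevDigits_zero : pvRevDigits 0 = [] := by
  rw [pvRevDigits]
  simp

theorem pvRevDigits_pos (n : Nat) (h : 0 < n) :
    pvRevDigits n = Nat.digitChar (n % 10) :: pvRevDigits (n / 10) := by
  conv_lhs => rw [pvRevDigits]
  rw [if_neg (by omega)]

theorem pvToDigitsCore_eq (f : Nat) : ∀ n ds, n < f → 0 < n →
    Nat.toDigitsCore 10 f n ds = (pvRevDigits n).reverse ++ ds := by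
  induction f with
  | zero => intro n ds h; omega
  | succ f ih =>
    intro n ds hf hn
    conv_lhs => rw [Nat.toDigitsCore]
    by_cases h0 : n / 10 = 0
    · rw [if_pos h0, pvRevDigits_pos n hn, h0, pvRevDigits_zero]
      simp
    · rw [if_neg h0, ih (n / 10) _ (by omega) (by omega), pvRevDigits_pos n hn]
      simp

theorem pvToDigits_eq (n : Nat) (hn : 0 < n) :
    Nat.toDigits 10 n = (pvRevDigits n).reverse := by
  have := pvToDigitsCore_eq (n + 1) n [] (by omega) hn
  simpa [Nat.toDigits] using this

-- the digit lookup in pvSupLoop, expressed through pvSupChar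
theorem pvLookup_eq (n : Int) (hn : 0 < n) :
    PySem.List.pyGetD pvSuperDigits (PySem.Int.mod n 10) "" =
      String.ofList [pvSupChar (Nat.digitChar (n.toNat % 10))] := by
  have hm : PySem.Int.mod n 10 = ((n.toNat % 10 : Nat) : Int) := by
    rw [PySem.Int.mod_eq_emod_of_pos (by omega)]
    omega
  rw [hm]
  have h10 : n.toNat % 10 < 10 := Nat.mod_lt _ (by omega)
  interval_cases (n.toNat % 10) <;> decide

theorem pvSupLoop_eq (k : Nat) : ∀ (n : Int) (acc : List String), n.toNat ≤ k → 0 < n →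
    pvSupLoop n acc = acc ++ (pvRevDigits n.toNat).map (fun c => String.ofList [pvSupChar c]) := by
  induction k with
  | zero => intro n acc hk hn; omega
  | succ k ih =>
    intro n acc hk hn
    rw [pvSupLoop, dif_pos hn]
    simp only []
    rw [pvLookup_eq n hn]
    have hfd : PySem.Int.floordiv n 10 = ((n.toNat / 10 : Nat) : Int) := by
      rw [PySem.Int.floordiv_eq_ediv_of_pos (by omega)]
      omega
    by_cases h0 : n.toNat / 10 = 0
    · rw [hfd, h0]
      rw [pvSupLoop, dif_neg (by norm_num), pvRevDigits_pos n.toNat (by omega), h0,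
        pvRevDigits_zero]
      simp
    · rw [hfd, ih _ _ (by omega) (by exact_mod_cast Nat.pos_of_ne_zero h0),
        pvRevDigits_pos n.toNat (by omega)]
      simp
      have hmax : (max n 0 / 10).toNat = n.toNat / 10 := by omega
      rw [hmax]

-- A's superscript string for n > 0: each decimal digit of n mapped through pvSupChar
theorem pvNumToSuperscript_eq (n : Int) (hn : 0 < n) :
    (num_to_superscript n).toList = (PySem.Int.toChars n).map pvSupChar := by
  rw [num_to_superscript, pvSupLoop_eq n.toNat n [] le_rfl hn]
  rw [PySem.Str.toList_join]
  have : (((pvRevDigits n.toNat).map (fun c => String.ofList [pvSupChar c])).reverse).map String.toList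
      = ((pvRevDigits n.toNat).reverse.map pvSupChar).map (fun c => [c]) := by
    simp [List.map_reverse, Function.comp]
  rw [List.nil_append, this, show ("" : String).toList = [] from rfl]
  rw [PySem.Chars.join_nil_singletons]
  rw [PySem.Int.toChars, if_neg (by omega), pvToDigits_eq n.toNat (by omega)]

theorem pvTerm_toList (be : Int × Int) :
    (pvTerm be).toList =
      PySem.Int.toChars be.1 ++ (if be.2 > 1 then (PySem.Int.toChars be.2).map pvSupChar else []) := by
  rw [pvTerm]
  split_ifs <;> simp

-- concatenating the pieces A pushes for one element gives B's term
theorem pvPieces_toList (be : Int × Int) :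
    PySem.Chars.join [] (([PySem.Int.toStr be.1] ++
        (if be.2 > 1 then [num_to_superscript be.2] else [])).map String.toList) =
      (pvTerm be).toList := by
  rw [pvTerm_toList]
  by_cases h : be.2 > 1
  · simp only [if_pos h, List.map_append, List.map_cons, List.map_nil]
    rw [show ([(PySem.Int.toStr be.1).toList] ++ [(num_to_superscript be.2).toList]) =
        [(PySem.Int.toStr be.1).toList, (num_to_superscript be.2).toList] by simp]
    rw [PySem.Chars.join_cons_cons, PySem.Chars.join_singleton]
    rw [pvNumToSuperscript_eq be.2 (by omega), PySem.Int.toList_toStr]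
    simp
  · simp only [if_neg h]
    simp [PySem.Chars.join_singleton, PySem.Int.toList_toStr]

def pvPieceList (be : Int × Int) : List String :=
  [PySem.Int.toStr be.1] ++ (if be.2 > 1 then [num_to_superscript be.2] else [])

def pvF : List String × Bool → Int × Int → List String × Bool := fun st be =>
    let sl := if st.2 = false then st.1 ++ [" \u00D7 "] else st.1
    let sl := sl ++ [PySem.Int.toStr be.1]
    let sl := if be.2 > 1 then sl ++ [num_to_superscript be.2] else sl
    (sl, false)

theorem pvFoldA_false (l : List (Int × Int)) : ∀ acc,
    List.foldl pvF (acc, false) l =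
      (acc ++ l.flatMap (fun be => " \u00D7 " :: pvPieceList be), false) := by
  induction l with
  | nil => intro acc; simp
  | cons be rest ih =>
    intro acc
    simp only [List.foldl_cons]
    rw [show pvF (acc, false) be = (acc ++ (" \u00D7 " :: pvPieceList be), false) by
      simp [pvF, pvPieceList]; split_ifs <;> simp]
    rw [ih]
    simp [pvPieceList]

theorem pvJoinNil_flatten : ∀ (ps : List (List Char)), PySem.Chars.join [] ps = ps.flatten := by
  intro ps
  induction ps with
  | nil => simp [PySem.Chars.join_nil]
  | cons p rest ih =>
    cases rest with
    | nil => simp [PySem.Chars.join_singleton]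
    | cons q r =>
      rw [PySem.Chars.join_cons_cons]
      simp only [List.flatten_cons] at ih ⊢
      rw [ih]
      simp

theorem pvAssemble (rest : List (Int × Int)) : ∀ (be : Int × Int),
    ((pvPieceList be ++ rest.flatMap (fun b => " \u00D7 " :: pvPieceList b)).map String.toList).flatten =
      PySem.Chars.join " \u00D7 ".toList ((pvTerm be).toList :: (rest.map pvTerm).map String.toList) := by
  induction rest with
  | nil =>
    intro be
    simp only [List.map_nil, List.flatMap_nil, List.append_nil]
    rw [PySem.Chars.join_singleton]
    have := pvPieces_toList be
    rw [pvJoinNil_flatten] at this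
    simpa [pvPieceList] using this
  | cons b2 r ih =>
    intro be
    simp only [List.map_cons, PySem.Chars.join_cons_cons]
    have h1 := pvPieces_toList be
    rw [pvJoinNil_flatten] at h1
    have h2 := ih b2
    simp only [List.flatMap_cons, List.map_append, List.flatten_append, List.map_cons,
      List.flatten_cons] at h2 ⊢
    rw [← h2]
    have h1' : ((pvPieceList be).map String.toList).flatten = (pvTerm be).toList := by
      simpa [pvPieceList] using h1
    rw [h1']
    simp

-- ===== VERDICT (by name: the statement is the Claim_ definition above) =====
theorem generate_index_format_string_spec : Claim_equal_generate_index_format_string := by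
  intro lbe _
  show generate_index_format_string lbe = generate_index_format_string_alt lbe
  apply String.toList_inj.mp
  rw [generate_index_format_string, generate_index_format_string_alt]
  cases lbe with
  | nil => simp [PySem.Str.toList_join, PySem.Chars.join_nil]
  | cons be rest =>
    show (PySem.Str.join "" (List.foldl pvF ([], true) (be :: rest)).1).toList = _
    rw [List.foldl_cons]
    rw [show pvF (([], true) : List String × Bool) be = (pvPieceList be, false) by
      simp [pvF, pvPieceList]; split_ifs <;> simp]
    rw [pvFoldA_false]
    simp only [PySem.Str.toList_join]
    rw [show ("" : String).toList = [] from rfl, pvJoinNil_flatten, List.map_cons]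
    exact pvAssemble rest be
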